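-- pv_equiv track=rewrite | github.com/jfjoung/Mechanistic_dataset | utils/explicit_H.py | detect_hydrogen_changes
-- ===== SOURCE A (Python) =====
-- def detect_hydrogen_changes(reactant_dict, product_dict):
--     hydrogen_changes = {'lost': {}, 'gained': {}}
--     total_lost = 0
--     total_gained = 0
--
--     for key in reactant_dict:
--         if key in product_dict:
--             r_h_count = reactant_dict[key]['h_count']
--             p_h_count = product_dict[key]['h_count']
--             if r_h_count > p_h_count:
--                 hydrogen_changes['lost'][key] = r_h_count - p_h_count
--                 total_lost += r_h_count - p_h_count
--             elif r_h_count < p_h_count: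
--                 hydrogen_changes['gained'][key] = p_h_count - r_h_count
--                 total_gained += p_h_count - r_h_count
--
--     return hydrogen_changes, total_lost, total_gained
-- ===== SOURCE B (Python) =====
-- def detect_hydrogen_changes(reactant_dict, product_dict):
--     # Divide-and-conquer over the reactant items: split the item list in half,
--     # solve each half, and merge (keys are unique, so dict-merge preserves order).
--     def go(items):
--         if not items:
--             return {}, {}, 0, 0
--         if len(items) == 1:
--             k, v = items[0]
--             if k in product_dict:
--                 d = v['h_count'] - product_dict[k]['h_count']
--                 if d > 0:
--                     return {k: d}, {}, d, 0
--                 if d < 0: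
--                     return {}, {k: -d}, 0, -d
--             return {}, {}, 0, 0
--         mid = len(items) // 2
--         l1, g1, tl1, tg1 = go(items[:mid])
--         l2, g2, tl2, tg2 = go(items[mid:])
--         return {**l1, **l2}, {**g1, **g2}, tl1 + tl2, tg1 + tg2
--
--     lost, gained, total_lost, total_gained = go(list(reactant_dict.items()))
--     return {'lost': lost, 'gained': gained}, total_lost, total_gained
-- ===== Notes on version B (the rewrite author's own statement) =====
-- stated objective: alternative
-- what changed: A's single linear branch-and-accumulate loop is replaced by a divide-and-conquer recursion: the reactant item list is split in half, each half is solved recursively into (lost, gained, total_lost, total_gained), and the sub-results are combined by order-preserving dict merges and sum additions; correctness of the merge relies on reactant keys being unique.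
import Mathlib
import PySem

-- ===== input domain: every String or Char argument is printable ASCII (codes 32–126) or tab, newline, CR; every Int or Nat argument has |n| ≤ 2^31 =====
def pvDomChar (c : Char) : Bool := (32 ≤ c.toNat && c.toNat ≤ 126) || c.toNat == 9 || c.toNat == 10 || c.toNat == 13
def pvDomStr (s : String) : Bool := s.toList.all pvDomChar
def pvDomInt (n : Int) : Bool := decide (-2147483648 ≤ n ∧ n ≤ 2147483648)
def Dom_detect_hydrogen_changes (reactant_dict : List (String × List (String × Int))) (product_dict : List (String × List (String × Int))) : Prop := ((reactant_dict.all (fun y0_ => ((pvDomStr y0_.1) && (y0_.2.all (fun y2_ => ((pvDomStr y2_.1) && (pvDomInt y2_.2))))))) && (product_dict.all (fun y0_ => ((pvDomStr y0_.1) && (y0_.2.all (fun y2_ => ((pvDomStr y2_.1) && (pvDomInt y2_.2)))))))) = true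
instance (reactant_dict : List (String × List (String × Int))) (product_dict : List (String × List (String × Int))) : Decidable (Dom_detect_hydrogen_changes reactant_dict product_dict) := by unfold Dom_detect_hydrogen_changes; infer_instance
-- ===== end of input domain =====

-- B replaces A's single linear branch-and-accumulate loop by a divide-and-conquer recursion over the
-- reactant item list (split in half, solve halves, merge the sub-dicts and add the sub-totals);
-- objective: alternative decomposition, no speed claim.
-- Pre_ excludes exactly the inputs where the Python raises KeyError ('h_count' missing on a key
-- shared by both dicts); on those excluded inputs the pvH helper below supplies 0, but nothing is
-- claimed there.

-- shared helper: v['h_count'] (the inputs are dicts as assoc lists; ofList = dict(v));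
-- the default 0 is only reached outside Pre_.
def pvH (v : List (String × Int)) : Int := (PySem.Dict.ofList v).getD "h_count" 0

-- ===== PORT A =====
-- loop body of A: state = (hydrogen_changes['lost'], hydrogen_changes['gained'], total_lost, total_gained)
def stepA (pd : PySem.Dict String (List (String × Int)))
    (st : PySem.Dict String Int × PySem.Dict String Int × Int × Int)
    (kv : String × List (String × Int)) :
    PySem.Dict String Int × PySem.Dict String Int × Int × Int :=
  match pd.get? kv.1 with
  | none => st
  | some pv =>
    if pvH pv < pvH kv.2 then
      (st.1.insert kv.1 (pvH kv.2 - pvH pv), st.2.1, st.2.2.1 + (pvH kv.2 - pvH pv), st.2.2.2)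
    else if pvH kv.2 < pvH pv then
      (st.1, st.2.1.insert kv.1 (pvH pv - pvH kv.2), st.2.2.1, st.2.2.2 + (pvH pv - pvH kv.2))
    else st

def detect_hydrogen_changes (reactant_dict : List (String × List (String × Int))) (product_dict : List (String × List (String × Int))) : (List (String × List (String × Int))) × Int × Int :=
  let pd := PySem.Dict.ofList product_dict
  let st := (PySem.Dict.ofList reactant_dict).items.foldl (stepA pd)
      (PySem.Dict.empty, PySem.Dict.empty, 0, 0)
  ([("lost", st.1.items), ("gained", st.2.1.items)], st.2.2.1, st.2.2.2)

-- ===== PORT B =====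
-- {**d1, **d2} of Source B, ported step for step as Python evaluates it: start from d1's pairs and
-- insert d2's pairs in order (insert overwrites in place, new keys append) — exact for dict unpack.
def dmerge (a b : PySem.Dict String Int) : PySem.Dict String Int :=
  b.items.foldl (fun d kv => d.insert kv.1 kv.2) a

-- go of Source B: divide-and-conquer over the item list
def goB (pd : PySem.Dict String (List (String × Int)))
    (items : List (String × List (String × Int))) :
    PySem.Dict String Int × PySem.Dict String Int × Int × Int :=
  if h0 : items = [] then (PySem.Dict.empty, PySem.Dict.empty, 0, 0)
  else if h1 : items.length = 1 then
    match items with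
    | (k, v) :: _ =>
      match pd.get? k with
      | some pv =>
        let d := pvH v - pvH pv
        if 0 < d then (PySem.Dict.ofList [(k, d)], PySem.Dict.empty, d, 0)
        else if d < 0 then (PySem.Dict.empty, PySem.Dict.ofList [(k, -d)], 0, -d)
        else (PySem.Dict.empty, PySem.Dict.empty, 0, 0)
      | none => (PySem.Dict.empty, PySem.Dict.empty, 0, 0)
    | [] => (PySem.Dict.empty, PySem.Dict.empty, 0, 0)
  else
    let mid := items.length / 2
    let r1 := goB pd (items.take mid)
    let r2 := goB pd (items.drop mid)
    (dmerge r1.1 r2.1, dmerge r1.2.1 r2.2.1, r1.2.2.1 + r2.2.2.1, r1.2.2.2 + r2.2.2.2)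
termination_by items.length
decreasing_by
  · have h2 : 0 < items.length := List.length_pos_iff.mpr h0
    simp only [List.length_take]
    omega
  · have h2 : 0 < items.length := List.length_pos_iff.mpr h0
    simp only [List.length_drop]
    omega

def detect_hydrogen_changes_alt (reactant_dict : List (String × List (String × Int))) (product_dict : List (String × List (String × Int))) : (List (String × List (String × Int))) × Int × Int :=
  let pd := PySem.Dict.ofList product_dict
  let res := goB pd (PySem.Dict.ofList reactant_dict).items
  ([("lost", res.1.items), ("gained", res.2.1.items)], res.2.2.1, res.2.2.2)

-- ===== PRECONDITION & SPEC =====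
-- Pre_: every key present in both dicts has 'h_count' in both of its inner dicts — exactly the
-- inputs where the Python returns instead of raising KeyError.
def Pre_detect_hydrogen_changes (reactant_dict : List (String × List (String × Int))) (product_dict : List (String × List (String × Int))) : Prop :=
  ∀ kv ∈ (PySem.Dict.ofList reactant_dict).items,
    ∀ pv ∈ ((PySem.Dict.ofList product_dict).get? kv.1).toList,
      "h_count" ∈ kv.2.map Prod.fst ∧ "h_count" ∈ pv.map Prod.fst
instance (reactant_dict : List (String × List (String × Int))) (product_dict : List (String × List (String × Int))) : Decidable (Pre_detect_hydrogen_changes reactant_dict product_dict) := by unfold Pre_detect_hydrogen_changes; infer_instance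

def pvWitness_detect_hydrogen_changes : (List (String × List (String × Int))) × (List (String × List (String × Int))) :=
  ([("C", [("h_count", 3)]), ("O", [("h_count", 1)])],
   [("C", [("h_count", 1)]), ("N", [("h_count", 2)])])

def Spec_detect_hydrogen_changes (reactant_dict : List (String × List (String × Int))) (product_dict : List (String × List (String × Int))) (out : (List (String × List (String × Int))) × Int × Int) : Prop := out = detect_hydrogen_changes_alt reactant_dict product_dict
instance (reactant_dict : List (String × List (String × Int))) (product_dict : List (String × List (String × Int))) (out : (List (String × List (String × Int))) × Int × Int) : Decidable (Spec_detect_hydrogen_changes reactant_dict product_dict out) := by unfold Spec_detect_hydrogen_changes; infer_instance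

-- ===== CLAIM (what is proved, stated in full; the proofs are below) =====
def Claim_equal_detect_hydrogen_changes : Prop := ∀ (reactant_dict : List (String × List (String × Int))) (product_dict : List (String × List (String × Int))), Dom_detect_hydrogen_changes reactant_dict product_dict → Pre_detect_hydrogen_changes reactant_dict product_dict → Spec_detect_hydrogen_changes reactant_dict product_dict (detect_hydrogen_changes reactant_dict product_dict)

-- ===== LEMMAS AND PROOFS =====

-- the per-key delta table and its sign splits, over a generic item list (proof vocabulary)
def dl (pd : PySem.Dict String (List (String × Int))) (l : List (String × List (String × Int))) : List (String × Int) :=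
  l.filterMap (fun kv => (pd.get? kv.1).map (fun pv => (kv.1, pvH kv.2 - pvH pv)))
def ll (pd : PySem.Dict String (List (String × Int))) (l : List (String × List (String × Int))) : List (String × Int) :=
  (dl pd l).filter (fun kd => decide (0 < kd.2))
def gl (pd : PySem.Dict String (List (String × Int))) (l : List (String × List (String × Int))) : List (String × Int) :=
  ((dl pd l).filter (fun kd => decide (kd.2 < 0))).map (fun kd => (kd.1, -kd.2))

theorem dl_append (pd : PySem.Dict String (List (String × Int))) (a b : List (String × List (String × Int))) :
    dl pd (a ++ b) = dl pd a ++ dl pd b := by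
  simp [dl]

theorem ll_append (pd : PySem.Dict String (List (String × Int))) (a b : List (String × List (String × Int))) :
    ll pd (a ++ b) = ll pd a ++ ll pd b := by
  simp [ll, dl_append]

theorem gl_append (pd : PySem.Dict String (List (String × Int))) (a b : List (String × List (String × Int))) :
    gl pd (a ++ b) = gl pd a ++ gl pd b := by
  simp [gl, dl_append]

theorem dl_fst_sublist (pd : PySem.Dict String (List (String × Int))) (l : List (String × List (String × Int))) :
    ((dl pd l).map Prod.fst).Sublist (l.map Prod.fst) := by
  induction l with
  | nil => simp [dl]
  | cons kv t ih =>
    cases h : pd.get? kv.1 with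
    | none => simpa [dl, h] using List.Sublist.cons kv.1 ih
    | some pv => simpa [dl, h] using List.Sublist.cons₂ kv.1 ih

theorem ll_fst_sublist (pd : PySem.Dict String (List (String × Int))) (l : List (String × List (String × Int))) :
    ((ll pd l).map Prod.fst).Sublist (l.map Prod.fst) := by
  exact (List.Sublist.map Prod.fst List.filter_sublist).trans (dl_fst_sublist pd l)

theorem gl_fst_sublist (pd : PySem.Dict String (List (String × Int))) (l : List (String × List (String × Int))) :
    ((gl pd l).map Prod.fst).Sublist (l.map Prod.fst) := by
  have h : (gl pd l).map Prod.fst = ((dl pd l).filter (fun kd => decide (kd.2 < 0))).map Prod.fst := by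
    simp [gl, Function.comp]
  rw [h]
  exact (List.Sublist.map Prod.fst List.filter_sublist).trans (dl_fst_sublist pd l)

-- dict unpack of two dicts with fresh, distinct right-hand keys is list append
theorem dmerge_mk (a b : List (String × Int)) (hb : (b.map Prod.fst).Nodup)
    (hfresh : ∀ k ∈ b.map Prod.fst, k ∉ a.map Prod.fst) :
    dmerge (PySem.Dict.mk a) (PySem.Dict.mk b) = PySem.Dict.mk (a ++ b) := by
  apply PySem.Dict.ext
  have := PySem.Dict.items_foldl_insert_fresh (l := b) (k := Prod.fst) (v := Prod.snd)
      (d := PySem.Dict.mk a)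
      (by
        intro kv hkv
        rw [PySem.Dict.contains_eq_decide_mem_keys]
        simp only [decide_eq_false_iff_not]
        exact fun hm => hfresh kv.1 (List.mem_map_of_mem hkv) (by simpa [PySem.Dict.keys] using hm))
      hb
  simpa [dmerge] using this

theorem insert_empty_items (k : String) (d : Int) :
    ((PySem.Dict.mk [] : PySem.Dict String Int).insert k d) = PySem.Dict.mk [(k, d)] := by
  apply PySem.Dict.ext
  rw [PySem.Dict.items_insert_of_not_contains _ _ (by simp)]
  rfl

-- characterisation of B's divide-and-conquer: it computes the sign-split delta tables and their sums
theorem goB_eq (pd : PySem.Dict String (List (String × Int))) :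
    ∀ (n : Nat) (items : List (String × List (String × Int))), items.length ≤ n →
    (items.map Prod.fst).Nodup →
    goB pd items = (PySem.Dict.mk (ll pd items), PySem.Dict.mk (gl pd items),
        ((ll pd items).map Prod.snd).sum, ((gl pd items).map Prod.snd).sum) := by
  intro n
  induction n with
  | zero =>
    intro items hlen _
    have : items = [] := List.length_eq_zero_iff.mp (Nat.le_zero.mp hlen)
    subst this
    simp [goB, ll, gl, dl, PySem.Dict.empty]
  | succ m ih =>
    intro items hlen hnd
    by_cases h0 : items = []
    · subst h0; simp [goB, ll, gl, dl, PySem.Dict.empty]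
    · by_cases h1 : items.length = 1
      · obtain ⟨kv, hkv⟩ := List.length_eq_one_iff.mp h1
        subst hkv
        obtain ⟨k, v⟩ := kv
        rw [goB]
        simp only [h0, h1]
        cases hp : pd.get? k with
        | none => simp [hp, ll, gl, dl, PySem.Dict.empty]
        | some pv =>
          rcases lt_trichotomy (0 : Int) (pvH v - pvH pv) with hlt | heq | hgt
          · have h2 : pvH pv < pvH v := by omega
            simp [hp, hlt, h2, ll, gl, dl, PySem.Dict.ofList, PySem.Dict.update,
              not_lt_of_gt hlt, le_of_lt hlt, insert_empty_items, PySem.Dict.empty]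
          · have h2 : ¬ pvH pv < pvH v := by omega
            have h3 : ¬ pvH v < pvH pv := by omega
            simp [hp, ← heq, h2, h3, ll, gl, dl, PySem.Dict.empty]
          · have h2 : ¬ pvH pv < pvH v := by omega
            have h3 : pvH v < pvH pv := by omega
            simp [hp, hgt, h2, h3, ll, gl, dl, PySem.Dict.ofList, PySem.Dict.update,
              not_lt_of_gt hgt, le_of_lt hgt, insert_empty_items, PySem.Dict.empty]
      · rw [goB]
        simp only [h0, h1, dite_false]
        have hlen2 : 2 ≤ items.length := by
          have : items.length ≠ 0 := fun h => h0 (List.length_eq_zero_iff.mp h)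
          omega
        set mid := items.length / 2 with hmid
        have hmid1 : 1 ≤ mid := by omega
        have hmidlt : mid < items.length := by omega
        have hsplit : items.take mid ++ items.drop mid = items := List.take_append_drop _ _
        have hndt : ((items.take mid).map Prod.fst).Nodup := by
          have : ((items.take mid).map Prod.fst).Sublist (items.map Prod.fst) :=
            (List.take_sublist _ _).map _
          exact hnd.sublist this
        have hndd : ((items.drop mid).map Prod.fst).Nodup := by
          have : ((items.drop mid).map Prod.fst).Sublist (items.map Prod.fst) :=
            (List.drop_sublist _ _).map _
          exact hnd.sublist this
        have hdisj : ∀ x ∈ (items.drop mid).map Prod.fst, x ∉ (items.take mid).map Prod.fst := by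
          intro x hxd hxt
          have hnd' : ((items.take mid).map Prod.fst ++ (items.drop mid).map Prod.fst).Nodup := by
            rw [← List.map_append, hsplit]; exact hnd
          exact (List.disjoint_of_nodup_append hnd') hxt hxd
        have ht := ih (items.take mid) (by simp [List.length_take]; omega) hndt
        have hd := ih (items.drop mid) (by simp [List.length_drop]; omega) hndd
        rw [ht, hd]
        have hll : ll pd items = ll pd (items.take mid) ++ ll pd (items.drop mid) := by
          conv_lhs => rw [← hsplit]
          exact ll_append ..
        have hgl : gl pd items = gl pd (items.take mid) ++ gl pd (items.drop mid) := by
          conv_lhs => rw [← hsplit]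
          exact gl_append ..
        have hml : dmerge (PySem.Dict.mk (ll pd (items.take mid))) (PySem.Dict.mk (ll pd (items.drop mid)))
            = PySem.Dict.mk (ll pd items) := by
          rw [hll]
          refine dmerge_mk _ _ (hndd.sublist (ll_fst_sublist ..)) ?_
          intro x hx hx'
          exact hdisj x ((ll_fst_sublist ..).mem hx) ((ll_fst_sublist ..).mem hx')
        have hmg : dmerge (PySem.Dict.mk (gl pd (items.take mid))) (PySem.Dict.mk (gl pd (items.drop mid)))
            = PySem.Dict.mk (gl pd items) := by
          rw [hgl]
          refine dmerge_mk _ _ (hndd.sublist (gl_fst_sublist ..)) ?_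
          intro x hx hx'
          exact hdisj x ((gl_fst_sublist ..).mem hx) ((gl_fst_sublist ..).mem hx')
        simp only [hml, hmg, hll, hgl, List.map_append, List.sum_append]

-- loop invariant: A's fold from fresh-keyed accumulators appends exactly the filtered tables
theorem foldA_inv (pd : PySem.Dict String (List (String × Int)))
    (l : List (String × List (String × Int)))
    (lost gained : PySem.Dict String Int) (tl tg : Int)
    (hnd : (l.map Prod.fst).Nodup)
    (hlost : ∀ kv ∈ l, lost.contains kv.1 = false)
    (hgained : ∀ kv ∈ l, gained.contains kv.1 = false) :
    l.foldl (stepA pd) (lost, gained, tl, tg) =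
      (PySem.Dict.mk (lost.items ++ ll pd l),
       PySem.Dict.mk (gained.items ++ gl pd l),
       tl + ((ll pd l).map Prod.snd).sum,
       tg + ((gl pd l).map Prod.snd).sum) := by
  induction l generalizing lost gained tl tg with
  | nil => simp [ll, gl, dl]
  | cons kv t ih =>
    obtain ⟨k, v⟩ := kv
    simp only [List.map_cons, List.nodup_cons, List.mem_map] at hnd
    have hkt : ∀ kv' ∈ t, kv'.1 ≠ k := fun kv' h' he => hnd.1 ⟨kv', h', he⟩
    have hndt := hnd.2
    have hck : lost.contains k = false := hlost (k, v) (List.mem_cons_self ..)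
    have hgk : gained.contains k = false := hgained (k, v) (List.mem_cons_self ..)
    have hlt' : ∀ kv' ∈ t, lost.contains kv'.1 = false :=
      fun kv' h' => hlost kv' (List.mem_cons_of_mem _ h')
    have hgt' : ∀ kv' ∈ t, gained.contains kv'.1 = false :=
      fun kv' h' => hgained kv' (List.mem_cons_of_mem _ h')
    simp only [List.foldl_cons]
    cases hpv : pd.get? k with
    | none =>
      have hstep : stepA pd (lost, gained, tl, tg) (k, v) = (lost, gained, tl, tg) := by
        simp [stepA, hpv]
      have hdl : dl pd ((k, v) :: t) = dl pd t := by simp [dl, hpv]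
      rw [hstep, ih lost gained tl tg hndt hlt' hgt']
      simp only [ll, gl, hdl]
    | some pv =>
      have hdl : dl pd ((k, v) :: t) = (k, pvH v - pvH pv) :: dl pd t := by
        simp [dl, hpv]
      rcases lt_trichotomy (pvH pv) (pvH v) with hlt | heq | hgt
      · have hstep : stepA pd (lost, gained, tl, tg) (k, v) =
            (lost.insert k (pvH v - pvH pv), gained, tl + (pvH v - pvH pv), tg) := by
          simp [stepA, hpv, hlt]
        rw [hstep, ih (lost.insert k (pvH v - pvH pv)) gained (tl + (pvH v - pvH pv)) tg hndt
              (fun kv' h' => by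
                rw [PySem.Dict.contains_insert]
                simp [hkt kv' h', hlt' kv' h'])
              hgt']
        have hll : ll pd ((k, v) :: t) = (k, pvH v - pvH pv) :: ll pd t := by
          simp [ll, hdl, hlt]
        have hgl : gl pd ((k, v) :: t) = gl pd t := by
          simp [gl, hdl, le_of_lt hlt]
        rw [PySem.Dict.items_insert_of_not_contains _ _ hck, hll, hgl]
        simp only [List.append_assoc, List.singleton_append, List.map_cons, List.sum_cons,
          Prod.mk.injEq]
        exact ⟨trivial, trivial, by omega, trivial⟩
      · have hstep : stepA pd (lost, gained, tl, tg) (k, v) = (lost, gained, tl, tg) := by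
          have h1 : ¬ pvH pv < pvH v := by omega
          have h2 : ¬ pvH v < pvH pv := by omega
          simp [stepA, hpv, h1, h2]
        rw [hstep, ih lost gained tl tg hndt hlt' hgt']
        have hll : ll pd ((k, v) :: t) = ll pd t := by
          simp [ll, hdl, heq]
        have hgl : gl pd ((k, v) :: t) = gl pd t := by
          simp [gl, hdl, heq]
        rw [hll, hgl]
      · have hstep : stepA pd (lost, gained, tl, tg) (k, v) =
            (lost, gained.insert k (pvH pv - pvH v), tl, tg + (pvH pv - pvH v)) := by
          have h1 : ¬ pvH pv < pvH v := by omega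
          simp [stepA, hpv, h1, hgt]
        rw [hstep, ih lost (gained.insert k (pvH pv - pvH v)) tl (tg + (pvH pv - pvH v)) hndt hlt'
              (fun kv' h' => by
                rw [PySem.Dict.contains_insert]
                simp [hkt kv' h', hgt' kv' h'])]
        have hll : ll pd ((k, v) :: t) = ll pd t := by
          simp [ll, hdl, le_of_lt hgt]
        have hgl : gl pd ((k, v) :: t) = (k, pvH pv - pvH v) :: gl pd t := by
          simp [gl, hdl, hgt]
        rw [PySem.Dict.items_insert_of_not_contains _ _ hgk, hll, hgl]
        simp only [List.append_assoc, List.singleton_append, List.map_cons, List.sum_cons,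
          Prod.mk.injEq]
        exact ⟨trivial, trivial, trivial, by omega⟩

-- ===== VERDICT (by name: the statement is the Claim_ definition above) =====
theorem detect_hydrogen_changes_spec : Claim_equal_detect_hydrogen_changes := by
  intro r p _dom _pre
  unfold Spec_detect_hydrogen_changes detect_hydrogen_changes detect_hydrogen_changes_alt
  dsimp only
  have hnd : (((PySem.Dict.ofList r).items.map Prod.fst) : List String).Nodup := by
    have := PySem.Dict.nodup_keys_ofList (κ := String) (ν := List (String × Int)) r
    simpa [PySem.Dict.keys] using this
  rw [foldA_inv (PySem.Dict.ofList p) (PySem.Dict.ofList r).items PySem.Dict.empty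
        PySem.Dict.empty 0 0 hnd (fun kv _ => PySem.Dict.contains_empty ..)
        (fun kv _ => PySem.Dict.contains_empty ..),
      goB_eq (PySem.Dict.ofList p) (PySem.Dict.ofList r).items.length
        (PySem.Dict.ofList r).items (le_refl _) hnd]
  simp [PySem.Dict.empty]
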